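-- pv_equiv track=rewrite | github.com/gary-1959/GNXEdit | src/tools/parameter.py | pack_data
-- ===== SOURCE A (Python) =====
-- def pack_data(data):
--     packed = []
--     pc = 0          # packet counter
--     for d in data:
--         if pc == 0:
--             packet = []
--             msb = 0x00
--             msmask = 0b01000000     # msb mask starts left == first
--
--         m = d & 0b10000000          # boes byte have bit 8 se
--         if m > 0:
--             msb = msb | msmask
--
--         packet.append(d & 0b01111111)
--
--         # next byte
--         pc += 1
--         msmask = msmask >> 1
--
--         # next packet
--         if pc == 8:
--             pc = 0
--             packet.insert(0, msb)
--             packed += packet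
--
--     if pc > 0:                      # partial packet remains
--         packet.insert(0, msb)
--         packed += packet
--
--     return packed
-- ===== SOURCE B (Python) =====
-- def pack_data(data):
--     # chunk decomposition: for each 8-byte slice, a header byte then the 7-bit bytes
--     packed = []
--     for i in range(0, len(data), 8):
--         chunk = data[i:i+8]
--         msb = 0
--         for j, byte in enumerate(chunk):
--             if byte & 0x80 > 0:
--                 msb |= 0x40 >> j
--         packed.append(msb)
--         packed.extend(b & 0x7f for b in chunk)
--     return packed
-- ===== Notes on version B (the rewrite author's own statement) =====
-- stated objective: simpler
-- what changed: A drives one flat loop with a packet counter, a shifting mask register and mutable packet state plus a trailing flush; B slices the data into 8-byte chunks (range(0,len,8)) and, per chunk, computes the MSB header with 0x40>>j over the enumerated bytes and emits [msb] plus the 7-bit bytes, so no counter/mask/flush state survives across chunks.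
import Mathlib
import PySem

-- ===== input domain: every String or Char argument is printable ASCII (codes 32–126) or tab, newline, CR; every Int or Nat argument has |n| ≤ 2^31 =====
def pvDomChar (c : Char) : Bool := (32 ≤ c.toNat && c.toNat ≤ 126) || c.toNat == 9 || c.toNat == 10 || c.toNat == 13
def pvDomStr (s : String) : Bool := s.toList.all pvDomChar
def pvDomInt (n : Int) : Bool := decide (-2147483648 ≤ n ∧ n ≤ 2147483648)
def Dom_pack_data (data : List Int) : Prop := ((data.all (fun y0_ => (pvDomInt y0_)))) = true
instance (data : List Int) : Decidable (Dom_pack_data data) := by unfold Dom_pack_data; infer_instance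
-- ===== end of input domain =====

-- B replaces A's flat counter-driven single pass (packet counter, shifting mask register, trailing flush) by an outer loop over 8-byte chunk slices (objective: simpler).

-- ===== PORT A =====
-- one loop iteration of A; state = (packed, pc, packet, msb, msmask)
def stepA (st : List Int × Int × List Int × Int × Int) (d : Int) : List Int × Int × List Int × Int × Int :=
  let packed := st.1; let pc := st.2.1
  let packet := if pc = 0 then [] else st.2.2.1
  let msb := if pc = 0 then 0 else st.2.2.2.1
  let msmask := if pc = 0 then 64 else st.2.2.2.2
  let m := PySem.Int.band d 128
  let msb := if m > 0 then PySem.Int.bor msb msmask else msb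
  let packet := packet ++ [PySem.Int.band d 127]
  let pc := pc + 1
  let msmask := msmask >>> (1 : Nat)   -- Python 'msmask >> 1'; exact: msmask is always nonnegative
  if pc = 8 then (packed ++ (msb :: packet), 0, packet, msb, msmask)
  else (packed, pc, packet, msb, msmask)

def pack_data (data : List Int) : List Int :=
  let s := data.foldl stepA ([], 0, [], 0, 0)
  if s.2.1 > 0 then s.1 ++ (s.2.2.2.1 :: s.2.2.1) else s.1   -- partial packet remains

-- ===== PORT B =====
-- one chunk iteration of the outer loop of B (i is the chunk's start index)
def stepB (data : List Int) (packed : List Int) (i : Int) : List Int :=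
  let chunk := PySem.List.slice data (some i) (some (i + 8))          -- data[i:i+8]
  let msb := (PySem.List.enumerate chunk 0).foldl
      (fun m jb => if PySem.Int.band jb.2 128 > 0 then PySem.Int.bor m ((64 : Int) >>> jb.1.toNat) else m) 0
      -- '0x40 >> j'; exact: enumerate indices are nonnegative
  (packed ++ [msb]) ++ chunk.map (fun b => PySem.Int.band b 127)

def pack_data_alt (data : List Int) : List Int :=
  (PySem.List.pyRange 0 data.length 8).foldl (stepB data) []

-- ===== PRECONDITION & SPEC =====
def Spec_pack_data (data : List Int) (out : List Int) : Prop := out = pack_data_alt data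
instance (data : List Int) (out : List Int) : Decidable (Spec_pack_data data out) := by unfold Spec_pack_data; infer_instance

-- ===== CLAIM (what is proved, stated in full; the proofs are below) =====
def Claim_equal_pack_data : Prop := ∀ (data : List Int), Dom_pack_data data → Spec_pack_data data (pack_data data)

-- ===== LEMMAS AND PROOFS =====

-- reference chunked recursion both ports are reduced to
def packB : Nat → List Int → Int → List Int → List Int
  | n, packet, msb, [] => if n = 0 then [] else msb :: packet
  | n, packet, msb, d :: ds =>
    let packet' := (if n = 0 then [] else packet) ++ [PySem.Int.band d 127]
    let msb' := if PySem.Int.band d 128 > 0 then PySem.Int.bor (if n = 0 then 0 else msb) ((64 : Int) >>> n)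
                else (if n = 0 then 0 else msb)
    if n + 1 = 8 then (msb' :: packet') ++ packB 0 [] 0 ds
    else packB (n + 1) packet' msb' ds

-- header accumulator
def hdrA : Int → List Int → Nat → Int
  | msb, [], _ => msb
  | msb, d :: ds, n => hdrA (if PySem.Int.band d 128 > 0 then PySem.Int.bor msb ((64 : Int) >>> n) else msb) ds (n + 1)

theorem packB_zero (packet : List Int) (msb : Int) (ds : List Int) :
    packB 0 packet msb ds = packB 0 [] 0 ds := by
  cases ds <;> simp [packB]

theorem A1 (data : List Int) : ∀ (n : Nat) (packed packet : List Int) (msb msmask : Int),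
    n ≤ 7 → (n ≠ 0 → msmask = (64 : Int) >>> n) →
    (let s := data.foldl stepA (packed, (n : Int), packet, msb, msmask)
     if s.2.1 > 0 then s.1 ++ (s.2.2.2.1 :: s.2.2.1) else s.1) = packed ++ packB n packet msb data := by
  induction data with
  | nil =>
    intro n packed packet msb msmask _ _
    rcases Nat.eq_zero_or_pos n with hn | hn
    · subst hn; simp [packB]
    · have hn' : n ≠ 0 := Nat.pos_iff_ne_zero.mp hn
      simp [packB, hn']
  | cons d ds ih =>
    intro n packed packet msb msmask h7 hm
    simp only [List.foldl_cons]
    rcases Nat.lt_or_ge n 7 with hlt | hge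
    · have hne8 : ((n : Int) + 1 = 8) = False := by
        simp; omega
      rcases Nat.eq_zero_or_pos n with hn | hn
      · subst hn
        have hstep : stepA (packed, ((0 : Nat) : Int), packet, msb, msmask) d =
            (packed, ((1 : Nat) : Int), [PySem.Int.band d 127],
             (if PySem.Int.band d 128 > 0 then PySem.Int.bor 0 64 else 0), 32) := by
          simp [stepA]; decide
        rw [hstep, ih 1 packed _ _ 32 (by omega) (by intro _; decide)]
        rw [packB]
        norm_num
      · have hn' : n ≠ 0 := Nat.pos_iff_ne_zero.mp hn
        have hmm : msmask = (64 : Int) >>> n := hm hn'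
        have hstep : stepA (packed, (n : Int), packet, msb, msmask) d =
            (packed, ((n + 1 : Nat) : Int), packet ++ [PySem.Int.band d 127],
             (if PySem.Int.band d 128 > 0 then PySem.Int.bor msb ((64 : Int) >>> n) else msb),
             msmask >>> (1 : Nat)) := by
          simp [stepA, hmm, hne8, Int.natCast_eq_zero, hn']
        have hshift : msmask >>> (1 : Nat) = (64 : Int) >>> (n + 1) := by
          subst hmm
          interval_cases n <;> decide
        rw [hstep, hshift, ih (n + 1) packed _ _ _ (by omega) (fun _ => rfl)]
        rw [packB]
        simp [hn', show n + 1 ≠ 8 by omega]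
    · have hn : n = 7 := by omega
      subst hn
      have hmm : msmask = (64 : Int) >>> 7 := hm (by omega)
      have hstep : stepA (packed, ((7 : Nat) : Int), packet, msb, msmask) d =
            (packed ++ ((if PySem.Int.band d 128 > 0 then PySem.Int.bor msb ((64 : Int) >>> 7) else msb)
                :: (packet ++ [PySem.Int.band d 127])),
             ((0 : Nat) : Int), packet ++ [PySem.Int.band d 127],
             (if PySem.Int.band d 128 > 0 then PySem.Int.bor msb ((64 : Int) >>> 7) else msb),
             msmask >>> (1 : Nat)) := by
          simp [stepA, hmm]
      rw [hstep, ih 0 _ _ _ _ (by omega) (fun h => absurd rfl h)]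
      rw [packB_zero, packB]
      simp
      rfl

theorem B1 (chunk : List Int) : ∀ (k : Nat) (m : Int),
    (PySem.List.enumerate chunk (k : Int)).foldl
        (fun m jb => if PySem.Int.band jb.2 128 > 0 then PySem.Int.bor m ((64 : Int) >>> jb.1.toNat) else m) m
      = hdrA m chunk k := by
  induction chunk with
  | nil => intro k m; simp [PySem.List.enumerate, hdrA]
  | cons c cs ih =>
    intro k m
    rw [PySem.List.enumerate_cons]
    have hcast : (k : Int) + 1 = ((k + 1 : Nat) : Int) := by push_cast; ring
    simp only [List.foldl_cons, Int.toNat_natCast, hcast, ih]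
    simp [hdrA, Int.shiftRight_natCast_right]

theorem B2 (chunk : List Int) : ∀ (ds : List Int) (n : Nat) (packet : List Int) (msb : Int),
    chunk.length + n = 8 → n ≤ 7 → (n = 0 → packet = [] ∧ msb = 0) →
    packB n packet msb (chunk ++ ds)
      = (hdrA msb chunk n :: (packet ++ chunk.map (fun b => PySem.Int.band b 127))) ++ packB 0 [] 0 ds := by
  induction chunk with
  | nil => intro ds n packet msb h8 h7 _; simp at h8; omega
  | cons c cs ih =>
    intro ds n packet msb h8 h7 h0
    simp only [List.length_cons] at h8
    rcases Nat.lt_or_ge n 7 with hn7 | hn7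
    · -- n < 7 : no emit yet, recurse
      have hne : n + 1 ≠ 8 := by omega
      rw [List.cons_append, packB]
      simp only [hne, if_false]
      rw [ih ds (n + 1) _ _ (by omega) (by omega) (by omega)]
      rcases Nat.eq_zero_or_pos n with hn | hn
      · rcases h0 hn with ⟨hp, hm⟩; subst hn hp hm; simp [hdrA]
      · have hn' : n ≠ 0 := Nat.pos_iff_ne_zero.mp hn
        simp [hdrA, hn']
    · -- n = 7 : the chunk ends here
      have hn : n = 7 := by omega
      subst hn
      have hcs : cs = [] := by
        have : cs.length = 0 := by omega
        exact List.length_eq_zero_iff.mp this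
      subst hcs
      rw [List.cons_append, List.nil_append, packB]
      simp [hdrA]

theorem B3 (chunk : List Int) : ∀ (n : Nat) (packet : List Int) (msb : Int),
    chunk.length + n < 8 → (n = 0 → packet = [] ∧ msb = 0) →
    packB n packet msb chunk
      = if chunk.length + n = 0 then [] else hdrA msb chunk n :: (packet ++ chunk.map (fun b => PySem.Int.band b 127)) := by
  induction chunk with
  | nil =>
    intro n packet msb _ h0
    rcases Nat.eq_zero_or_pos n with hn | hn
    · rcases h0 hn with ⟨hp, hm⟩; subst hn hp hm; simp [packB]
    · simp [packB, hdrA, Nat.pos_iff_ne_zero.mp hn]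
  | cons c cs ih =>
    intro n packet msb hlt h0
    have h8 : n + 1 ≠ 8 := by simp at hlt; omega
    rw [packB]
    simp only [h8, if_false]
    rw [ih (n + 1) _ _ (by simp at hlt ⊢; omega) (by omega)]
    rcases Nat.eq_zero_or_pos n with hn | hn
    · rcases h0 hn with ⟨hp, hm⟩; subst hn hp hm
      simp [hdrA]
    · have hn' : n ≠ 0 := Nat.pos_iff_ne_zero.mp hn
      simp [hdrA, hn']

theorem pyRange8_nil (a b : Int) (h : b ≤ a) : PySem.List.pyRange a b 8 = [] := by
  rw [PySem.List.pyRange_of_pos _ _ (by norm_num : (0:Int) < 8)]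
  simp [show ¬ a < b by omega]

theorem pyRange8_cons (a b : Int) (h : a < b) :
    PySem.List.pyRange a b 8 = a :: PySem.List.pyRange (a + 8) b 8 := by
  rw [PySem.List.pyRange_of_pos _ _ (by norm_num : (0:Int) < 8),
      PySem.List.pyRange_of_pos _ _ (by norm_num : (0:Int) < 8)]
  rcases lt_or_ge (a + 8) b with hb | hb
  · have hcnt : ((b - a + 8 - 1) / 8).toNat = ((b - (a + 8) + 8 - 1) / 8).toNat + 1 := by omega
    rw [if_pos h, if_pos hb, hcnt, List.range_succ_eq_map]
    simp only [List.map_cons, List.map_map]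
    congr 1
    · norm_num
    · exact List.map_congr_left (fun k _ => by simp [Function.comp]; ring)
  · have hcnt : ((b - a + 8 - 1) / 8).toNat = 1 := by omega
    rw [if_pos h, if_neg (by omega), hcnt]
    simp

-- the per-chunk step of packB 0 [] 0
theorem packB_chunk (xs : List Int) (hne : xs ≠ []) :
    packB 0 [] 0 xs
      = (hdrA 0 (xs.take 8) 0 :: (xs.take 8).map (fun b => PySem.Int.band b 127))
          ++ packB 0 [] 0 (xs.drop 8) := by
  rcases Nat.lt_or_ge xs.length 8 with hlt | hge
  · have htake : xs.take 8 = xs := List.take_of_length_le (by omega)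
    have hdrop : xs.drop 8 = [] := List.drop_of_length_le (by omega)
    rw [htake, hdrop, B3 _ 0 [] 0 (by omega) (by simp)]
    have hlen : xs.length ≠ 0 := by simpa using hne
    simp [hlen, packB]
  · conv_lhs => rw [(List.take_append_drop 8 xs).symm]
    rw [B2 _ _ 0 [] 0 (by rw [List.length_take]; omega) (by omega) (by simp)]
    simp

theorem altLoop (m : Nat) : ∀ (k : Nat) (data : List Int) (packed : List Int),
    data.length ≤ k + m →
    (PySem.List.pyRange (k : Int) data.length 8).foldl (stepB data) packed
      = packed ++ packB 0 [] 0 (data.drop k) := by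
  induction m with
  | zero =>
    intro k data packed hlen
    rw [pyRange8_nil _ _ (by exact_mod_cast Int.ofNat_le.mpr (by omega) : (data.length : Int) ≤ (k : Int)),
        List.drop_of_length_le (by omega)]
    simp [packB]
  | succ m ih =>
    intro k data packed hlen
    rcases Nat.lt_or_ge k data.length with hk | hk
    · rw [pyRange8_cons _ _ (by exact_mod_cast Int.ofNat_lt.mpr hk : (k : Int) < (data.length : Int))]
      rw [List.foldl_cons]
      have h8 : ((k : Int) + 8) = ((k : Int) + ((8 : Nat) : Int)) := by norm_num
      have hstep : stepB data packed (k : Int)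
          = (packed ++ [hdrA 0 ((data.drop k).take 8) 0])
              ++ ((data.drop k).take 8).map (fun b => PySem.Int.band b 127) := by
        rw [stepB]
        have hsl : PySem.List.slice data (some (k : Int)) (some ((k : Int) + 8))
            = (data.drop k).take 8 := by
          rw [h8, PySem.List.slice_natCast_add]
        have hB1 := B1 ((data.drop k).take 8) 0 0
        simp only [Nat.cast_zero] at hB1
        simp only [hsl, hB1]
      have hcast : ((k : Int) + 8) = (((k + 8 : Nat)) : Int) := by push_cast; ring
      rw [hstep, hcast, ih (k + 8) data _ (by omega)]
      rw [packB_chunk (data.drop k) (by simp; omega), List.take_drop, List.drop_drop]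
      simp
    · rw [pyRange8_nil _ _ (by exact_mod_cast Int.ofNat_le.mpr (by omega) : (data.length : Int) ≤ (k : Int)),
          List.drop_of_length_le (by omega)]
      simp [packB]

theorem altEq (data : List Int) : pack_data_alt data = packB 0 [] 0 data := by
  have h := altLoop data.length 0 data []
  simp only [Nat.cast_zero, List.drop_zero, List.nil_append] at h
  rw [pack_data_alt]
  exact h (by omega)

-- ===== VERDICT (by name: the statement is the Claim_ definition above) =====
theorem pack_data_spec : Claim_equal_pack_data := by
  intro data _
  unfold Spec_pack_data pack_data
  have h := A1 data 0 [] [] 0 0 (by norm_num) (by simp)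
  simp only [Nat.cast_zero] at h
  rw [h, altEq]
  simp
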